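-- pv_equiv track=rewrite | github.com/vincentbillaut/AoC2022 | day15.py | crop_zones
-- ===== SOURCE A (Python) =====
-- def crop_row(row, bounds):
--     if len(row) == 0:
--         return []
--     a, b = row[0]
--     if b < bounds[0]:
--         return crop_row(row[1:], bounds)
--     if a < bounds[0]:
--         return [(bounds[0], min(b, bounds[1]))] + crop_row(row[1:], bounds)
--     if a > bounds[1]:
--         return []
--     if b > bounds[1]:
--         return [(a, bounds[1])]
--     return [(a, b)] + crop_row(row[1:], bounds)
--
-- def crop_zones(zones, bounds):
--     dead_zones = zones.copy()
--     for y in list(zones.keys()):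
--         if not bounds[0] <= y <= bounds[1]:
--             del dead_zones[y]
--         else:
--             dead_zones[y] = crop_row(zones[y], bounds)
--     return dead_zones
-- ===== SOURCE B (Python) =====
-- def crop_zones(zones, bounds):
--     lo, hi = bounds
--     out = {}
--     for y, row in zones.items():
--         if lo <= y <= hi:
--             res = []
--             for a, b in row:
--                 if b < lo:
--                     continue
--                 if a < lo:
--                     res.append((lo, min(b, hi)))
--                     continue
--                 if a > hi:
--                     break
--                 if b > hi:
--                     res.append((a, hi))
--                     break
--                 res.append((a, b))
--             out[y] = res
--     return out
-- ===== Notes on version B (the rewrite author's own statement) =====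
-- stated objective: alternative
-- what changed: Per row, A recurses with row[1:] slicing and list concatenation and builds the result dict by copying the input then deleting/overwriting entries; B does one forward loop per row with append/continue/break and builds the output dict directly (measured ~1.2-1.5x, below the faster threshold).
import Mathlib
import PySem

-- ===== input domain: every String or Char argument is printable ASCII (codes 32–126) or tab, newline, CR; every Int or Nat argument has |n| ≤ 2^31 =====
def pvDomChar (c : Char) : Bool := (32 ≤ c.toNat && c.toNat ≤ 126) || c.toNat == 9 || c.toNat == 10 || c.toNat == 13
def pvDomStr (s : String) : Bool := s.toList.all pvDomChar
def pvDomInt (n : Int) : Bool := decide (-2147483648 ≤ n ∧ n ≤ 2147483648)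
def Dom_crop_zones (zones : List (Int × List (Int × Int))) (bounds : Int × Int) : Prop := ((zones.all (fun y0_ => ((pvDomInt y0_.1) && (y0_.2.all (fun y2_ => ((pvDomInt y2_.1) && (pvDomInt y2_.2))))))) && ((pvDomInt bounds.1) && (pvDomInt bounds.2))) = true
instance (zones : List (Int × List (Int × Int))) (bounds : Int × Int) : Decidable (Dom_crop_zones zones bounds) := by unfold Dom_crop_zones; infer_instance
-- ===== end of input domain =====

-- B replaces A's per-row recursion with slicing and list concatenation by a single forward loop
-- with append/continue/break, and builds the output dict directly instead of copy-then-delete/overwrite.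

-- ===== PORT A =====
-- crop_row: literal port of A's recursion (row[1:] of a cons cell is its tail)
def crop_row (row : List (Int × Int)) (bounds : Int × Int) : List (Int × Int) :=
  match row with
  | [] => []
  | (a, b) :: rest =>
    if b < bounds.1 then crop_row rest bounds
    else if a < bounds.1 then (bounds.1, min b bounds.2) :: crop_row rest bounds
    else if a > bounds.2 then []
    else if b > bounds.2 then [(a, bounds.2)]
    else (a, b) :: crop_row rest bounds

-- dead_zones = zones.copy() is the same association list ⟨zones⟩; zones[y] is ported as getD y []:
-- y comes from zones' own key list, so the key is present and getD is exact there (Pre_ keeps keys unique)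
def crop_zones (zones : List (Int × List (Int × Int))) (bounds : Int × Int) : List (Int × List (Int × Int)) :=
  ((PySem.Dict.keys (⟨zones⟩ : PySem.Dict Int (List (Int × Int)))).foldl
    (fun dz y =>
      if ¬ (bounds.1 ≤ y ∧ y ≤ bounds.2) then dz.erase y
      else dz.insert y (crop_row ((⟨zones⟩ : PySem.Dict Int (List (Int × Int))).getD y []) bounds))
    (⟨zones⟩ : PySem.Dict Int (List (Int × Int)))).items

-- ===== PORT B =====
-- the inner for-loop of Source B: res is the accumulator, 'break' returns it early
def crop_row_alt_loop (lo hi : Int) (row : List (Int × Int)) (res : List (Int × Int)) : List (Int × Int) :=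
  match row with
  | [] => res
  | (a, b) :: rest =>
    if b < lo then crop_row_alt_loop lo hi rest res
    else if a < lo then crop_row_alt_loop lo hi rest (res ++ [(lo, min b hi)])
    else if a > hi then res
    else if b > hi then res ++ [(a, hi)]
    else crop_row_alt_loop lo hi rest (res ++ [(a, b)])

def crop_zones_alt (zones : List (Int × List (Int × Int))) (bounds : Int × Int) : List (Int × List (Int × Int)) :=
  (zones.foldl (fun out p =>
      if bounds.1 ≤ p.1 ∧ p.1 ≤ bounds.2 then
        out.insert p.1 (crop_row_alt_loop bounds.1 bounds.2 p.2 [])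
      else out) (PySem.Dict.empty : PySem.Dict Int (List (Int × Int)))).items

-- ===== PRECONDITION & SPEC =====
-- Pre_ excludes association lists with duplicate keys: a Python dict cannot contain them, so such
-- lists are an artefact of the association-list representation, never inputs A receives.
def Pre_crop_zones (zones : List (Int × List (Int × Int))) (bounds : Int × Int) : Prop :=
  (zones.map Prod.fst).Nodup
instance (zones : List (Int × List (Int × Int))) (bounds : Int × Int) : Decidable (Pre_crop_zones zones bounds) := by unfold Pre_crop_zones; infer_instance
def pvWitness_crop_zones : (List (Int × List (Int × Int))) × (Int × Int) := ([(0, [(-1, 1)]), (3, [(0, 5)])], (0, 2))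
def Spec_crop_zones (zones : List (Int × List (Int × Int))) (bounds : Int × Int) (out : List (Int × List (Int × Int))) : Prop := out = crop_zones_alt zones bounds
instance (zones : List (Int × List (Int × Int))) (bounds : Int × Int) (out : List (Int × List (Int × Int))) : Decidable (Spec_crop_zones zones bounds out) := by unfold Spec_crop_zones; infer_instance

-- ===== CLAIM (what is proved, stated in full; the proofs are below) =====
def Claim_equal_crop_zones : Prop := ∀ (zones : List (Int × List (Int × Int))) (bounds : Int × Int), Dom_crop_zones zones bounds → Pre_crop_zones zones bounds → Spec_crop_zones zones bounds (crop_zones zones bounds)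

-- ===== LEMMAS AND PROOFS =====

-- B's loop accumulates exactly A's recursion
theorem crop_row_alt_loop_eq (lo hi : Int) (row res : List (Int × Int)) :
    crop_row_alt_loop lo hi row res = res ++ crop_row row (lo, hi) := by
  induction row generalizing res with
  | nil => simp [crop_row_alt_loop, crop_row]
  | cons p rest ih =>
    obtain ⟨a, b⟩ := p
    simp only [crop_row_alt_loop, crop_row]
    split_ifs <;> simp [ih]

-- the per-entry result both folds produce
def pvF (bounds : Int × Int) (p : Int × List (Int × Int)) : Option (Int × List (Int × Int)) :=
  if bounds.1 ≤ p.1 ∧ p.1 ≤ bounds.2 then some (p.1, crop_row p.2 bounds) else none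

-- A's loop over the dict's own keys: entries in range get overwritten in place, the rest deleted
theorem crop_zones_A_fold (bounds : Int × Int) (v : Int → List (Int × Int)) :
    ∀ (rest pre : List (Int × List (Int × Int))),
    ((pre ++ rest).map Prod.fst).Nodup →
    (∀ p ∈ rest, v p.1 = p.2) →
    ((rest.map (fun x => x.1)).foldl (fun dz y =>
        if ¬ (bounds.1 ≤ y ∧ y ≤ bounds.2) then dz.erase y
        else dz.insert y (crop_row (v y) bounds))
      (⟨pre ++ rest⟩ : PySem.Dict Int (List (Int × Int)))).items
      = pre ++ rest.filterMap (pvF bounds) := by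
  intro rest
  induction rest with
  | nil => intro pre _ _; simp
  | cons q t ih =>
    intro pre hnd hv
    obtain ⟨y, r⟩ := q
    have hnd' := List.nodup_append.mp (by simpa using hnd :
      (pre.map Prod.fst ++ y :: t.map Prod.fst).Nodup)
    have hypre : ∀ p ∈ pre, p.1 ≠ y := by
      intro p hp h
      exact hnd'.2.2 _ (List.mem_map_of_mem hp) _ (List.mem_cons_self ..) h
    have hyt : ∀ p ∈ t, p.1 ≠ y := by
      intro p hp h
      exact (List.nodup_cons.mp hnd'.2.1).1 (h ▸ List.mem_map_of_mem hp)
    simp only [List.map_cons, List.foldl_cons]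
    by_cases hP : bounds.1 ≤ y ∧ y ≤ bounds.2
    · -- insert branch: overwrites the (y, r) entry in place
      have hvy : v y = r := hv (y, r) (by simp)
      have hmap : ∀ (l : List (Int × List (Int × Int))), (∀ p ∈ l, p.1 ≠ y) →
          l.map (fun p => if (p.1 == y) = true then (y, crop_row (v y) bounds) else p) = l := by
        intro l hl
        have h := List.map_congr_left (l := l)
          (f := fun p => if (p.1 == y) = true then (y, crop_row (v y) bounds) else p)
          (g := fun p => p) (by intro a ha; simp [hl a ha])
        simpa using h
      have hins :
          ((⟨pre ++ (y, r) :: t⟩ : PySem.Dict Int (List (Int × Int))).insert y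
            (crop_row (v y) bounds))
          = (⟨(pre ++ [(y, crop_row r bounds)]) ++ t⟩ : PySem.Dict Int (List (Int × Int))) := by
        have hc : (⟨pre ++ (y, r) :: t⟩ : PySem.Dict Int (List (Int × Int))).contains y = true := by
          simp [PySem.Dict.contains]
        simp only [PySem.Dict.insert, hc, if_true]
        congr 1
        simp only [List.map_append, List.map_cons]
        rw [hmap pre hypre, hmap t hyt]
        simp [hvy]
      rw [if_neg (by simpa using hP), hins,
          ih (pre ++ [(y, crop_row r bounds)])
            (by
              have he : ((pre ++ [(y, crop_row r bounds)]) ++ t).map Prod.fst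
                   = pre.map Prod.fst ++ y :: t.map Prod.fst := by simp
              rw [he]; exact (by simpa using hnd))
            (fun p hp => hv p (by simp [hp]))]
      simp [pvF, hP]
    · -- erase branch: removes the (y, r) entry
      have hfil : ∀ (l : List (Int × List (Int × Int))), (∀ p ∈ l, p.1 ≠ y) →
          l.filter (fun p => !(p.1 == y)) = l := by
        intro l hl
        exact List.filter_eq_self.mpr (by intro a ha; simp [hl a ha])
      have hera :
          ((⟨pre ++ (y, r) :: t⟩ : PySem.Dict Int (List (Int × Int))).erase y)
          = (⟨pre ++ t⟩ : PySem.Dict Int (List (Int × Int))) := by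
        simp only [PySem.Dict.erase]
        congr 1
        rw [List.filter_append, List.filter_cons_of_neg (by simp), hfil pre hypre, hfil t hyt]
      rw [if_pos (by simpa using hP), hera,
          ih pre
            (by
              rw [List.map_append]
              exact List.nodup_append.mpr ⟨hnd'.1, (List.nodup_cons.mp hnd'.2.1).2,
                fun a h1 b h2 => hnd'.2.2 a h1 b (List.mem_cons_of_mem _ h2)⟩)
            (fun p hp => hv p (by simp [hp]))]
      simp [pvF, hP]

-- B's loop: each kept entry is a fresh key, so inserts simply append
theorem crop_zones_B_fold (bounds : Int × Int) :
    ∀ (zones : List (Int × List (Int × Int))) (d : PySem.Dict Int (List (Int × Int))),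
    (zones.map Prod.fst).Nodup →
    (∀ p ∈ zones, d.contains p.1 = false) →
    (zones.foldl (fun out p =>
        if bounds.1 ≤ p.1 ∧ p.1 ≤ bounds.2 then
          out.insert p.1 (crop_row_alt_loop bounds.1 bounds.2 p.2 [])
        else out) d).items
      = d.items ++ zones.filterMap (pvF bounds) := by
  intro zones
  induction zones with
  | nil => intro d _ _; simp
  | cons q t ih =>
    intro d hnd hfresh
    obtain ⟨y, r⟩ := q
    have hnd' := List.nodup_cons.mp (by simpa using hnd : (y :: t.map Prod.fst).Nodup)
    have hyt : ∀ p ∈ t, p.1 ≠ y := by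
      intro p hp h
      exact hnd'.1 (h ▸ List.mem_map_of_mem hp)
    simp only [List.foldl_cons]
    by_cases hP : bounds.1 ≤ y ∧ y ≤ bounds.2
    · have hc : d.contains y = false := hfresh (y, r) (by simp)
      rw [if_pos hP,
          ih _ (by simpa using hnd'.2)
            (by
              intro p hp
              rw [PySem.Dict.contains_insert]
              simp [hyt p hp, hfresh p (by simp [hp])]),
          PySem.Dict.items_insert_of_not_contains _ _ hc]
      simp [pvF, hP, crop_row_alt_loop_eq]
    · rw [if_neg hP, ih _ (by simpa using hnd'.2) (fun p hp => hfresh p (by simp [hp]))]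
      simp [pvF, hP]

-- ===== VERDICT (by name: the statement is the Claim_ definition above) =====
theorem crop_zones_spec : Claim_equal_crop_zones := by
  intro zones bounds _ hpre
  unfold Spec_crop_zones crop_zones crop_zones_alt
  have hA := crop_zones_A_fold bounds
      (fun y => (⟨zones⟩ : PySem.Dict Int (List (Int × Int))).getD y []) zones []
      (by simpa using hpre)
      (by
        intro p hp
        exact PySem.Dict.getD_of_mem_items (⟨zones⟩ : PySem.Dict Int (List (Int × Int)))
          (by simpa [PySem.Dict.items] using hp)
          (by simp only [PySem.Dict.keys]; exact hpre) [])
  have hB := crop_zones_B_fold bounds zones PySem.Dict.empty hpre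
      (by intro p _; simp [PySem.Dict.contains, PySem.Dict.empty])
  rw [hB]
  exact hA
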